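-- pv_equiv track=rewrite | github.com/pypi-data/pypi-mirror-279 | packages/czech-syllable-splitter/czech_syllable_splitter-0.1.0-py3-none-any.whl/czech_syllable_splitter/czech_syllable_splitter.py | split_to_characters
-- ===== SOURCE A (Python) =====
-- def split_to_characters(word: str) -> list[str]:
--     """
--     Split the word into individual characters, respecting czech 'ch' character
--     """
--     word_letters = list(word.lower())
--     # collapse subsequent 'c' and 'h' into one character
--     word_chars = []
--     was_ch = False
--     for i, char in enumerate(word_letters):
--         if char in ['c', 'C'] and i < len(word_letters) - 1 and word_letters[i + 1] in ['h', 'H']: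
--             word_chars.append(char + word_letters[i + 1])
--             was_ch = True
--         elif was_ch:
--             was_ch = False
--             continue
--         else:
--             word_chars.append(char)
--     return word_chars
-- ===== SOURCE B (Python) =====
-- def split_to_characters(word: str) -> list[str]:
--     """
--     Split the word into individual characters, respecting czech 'ch' character
--     """
--     s = word.lower()
--     out = []
--     i = 0
--     n = len(s)
--     while i < n:
--         if s.startswith('ch', i):
--             out.append('ch')
--             i += 2
--         else:
--             out.append(s[i])
--             i += 1
--     return out
-- ===== Notes on version B (the rewrite author's own statement) =====
-- stated objective: simpler
-- what changed: Replaces the index loop over enumerate with lookahead indexing and a was_ch skip flag by a single consuming tokenizer that, at each position, takes the Czech digraph (advancing 2) or one character (advancing 1); no flag, no continue, no index arithmetic into the full list.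
import Mathlib
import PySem

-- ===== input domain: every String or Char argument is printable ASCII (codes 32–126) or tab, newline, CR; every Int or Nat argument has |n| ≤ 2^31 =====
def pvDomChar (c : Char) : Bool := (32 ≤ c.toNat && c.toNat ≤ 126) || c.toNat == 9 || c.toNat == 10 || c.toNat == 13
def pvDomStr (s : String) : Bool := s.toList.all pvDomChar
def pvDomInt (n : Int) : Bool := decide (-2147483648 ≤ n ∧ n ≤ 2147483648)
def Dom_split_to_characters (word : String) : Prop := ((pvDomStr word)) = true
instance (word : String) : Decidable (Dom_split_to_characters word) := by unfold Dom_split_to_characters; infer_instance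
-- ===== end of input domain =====

-- B replaces A's index loop with lookahead and a skip flag by a single consuming
-- tokenizer that eats the Czech digraph (2 chars) or one char per step (objective: simpler).

-- ===== PORT A =====
-- the for-loop over enumerate(word_letters), carrying the was_ch flag and the output list
def pvALoop (letters : List Char) : List Char → Nat → Bool → List String → List String
  | [], _, _, acc => acc
  | char :: rest, i, was_ch, acc =>
    if (char = 'c' ∨ char = 'C') ∧ i < letters.length - 1 ∧
       (letters.getD (i + 1) ' ' = 'h' ∨ letters.getD (i + 1) ' ' = 'H') then
      pvALoop letters rest (i + 1) true (acc ++ [String.ofList [char, letters.getD (i + 1) ' ']])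
    else if was_ch then
      pvALoop letters rest (i + 1) false acc
    else
      pvALoop letters rest (i + 1) false (acc ++ [String.ofList [char]])

def split_to_characters (word : String) : List String :=
  let word_letters := (PySem.Str.lower word).toList
  pvALoop word_letters word_letters 0 false []

-- ===== PORT B =====
-- the while loop of Source B: at each position, startswith('ch', i) consumes two chars, else one
def pvBLoop : List Char → List String
  | [] => []
  | c :: rest =>
    if c = 'c' ∧ rest.head? = some 'h' then
      "ch" :: pvBLoop rest.tail
    else
      String.ofList [c] :: pvBLoop rest
termination_by l => l.length
decreasing_by all_goals simp [List.length_tail]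

def split_to_characters_alt (word : String) : List String :=
  pvBLoop (PySem.Str.lower word).toList

-- ===== PRECONDITION & SPEC =====
def Spec_split_to_characters (word : String) (out : List String) : Prop := out = split_to_characters_alt word
instance (word : String) (out : List String) : Decidable (Spec_split_to_characters word out) := by unfold Spec_split_to_characters; infer_instance

-- ===== CLAIM (what is proved, stated in full; the proofs are below) =====
def Claim_equal_split_to_characters : Prop := ∀ (word : String), Dom_split_to_characters word → Spec_split_to_characters word (split_to_characters word)

-- ===== LEMMAS AND PROOFS =====

theorem lowerChar_ne_upper (c u : Char) (hu : PySem.Chars.isupper u = true) :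
    PySem.Chars.lowerChar c ≠ u := by
  have hu' : 65 ≤ u.toNat ∧ u.toNat ≤ 90 := by
    simp [PySem.Chars.isupper] at hu
    exact ⟨Fin.mk_le_mk.mp hu.1, Fin.mk_le_mk.mp hu.2⟩
  intro he
  unfold PySem.Chars.lowerChar at he
  split at he
  · next h =>
    have h' : 65 ≤ c.toNat ∧ c.toNat ≤ 90 := by
      simp [PySem.Chars.isupper] at h
      exact ⟨Fin.mk_le_mk.mp h.1, Fin.mk_le_mk.mp h.2⟩
    have h2 := congrArg Char.toNat he
    rw [Char.toNat_ofNat, if_pos (by constructor; omega)] at h2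
    omega
  · next h => rw [he] at h; simp [hu] at h

theorem not_mem_lower_of_upper (s : List Char) (u : Char)
    (hu : PySem.Chars.isupper u = true) : u ∉ PySem.Chars.lower s := by
  simp [PySem.Chars.lower]
  intro c _ he
  exact lowerChar_ne_upper c u hu he

theorem getD_eq_headD_drop (l : List Char) (n : Nat) (d : Char) :
    l.getD n d = (l.drop n).headD d := by
  simp [List.getD_eq_getElem?_getD, List.headD_eq_head?_getD, List.head?_drop]

theorem pvALoop_eq_pvBLoop (suffix letters : List Char) :
    ∀ (i : Nat) (acc : List String), letters.drop i = suffix →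
    'C' ∉ letters → 'H' ∉ letters →
    pvALoop letters suffix i false acc = acc ++ pvBLoop suffix := by
  induction suffix using pvBLoop.induct with
  | case1 =>
    intro i acc _ _ _
    simp [pvALoop, pvBLoop]
  | case2 c rest h ih =>
    intro i acc hdrop hC hH
    obtain ⟨hc, hh⟩ := h
    obtain ⟨t, ht⟩ : ∃ t, rest = 'h' :: t := by
      cases rest with
      | nil => simp at hh
      | cons a b => simp at hh; exact ⟨b, by rw [hh]⟩
    subst hc ht
    have hlen : letters.length - i = t.length + 2 := by
      have := congrArg List.length hdrop
      simp at this; omega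
    have hile : i ≤ letters.length := by omega
    have hdrop1 : letters.drop (i + 1) = 'h' :: t := by
      have : (letters.drop i).drop 1 = letters.drop (i + 1) := List.drop_drop ..
      rw [hdrop] at this
      simpa using this.symm
    have hdrop2 : letters.drop (i + 2) = t := by
      have : (letters.drop i).drop 2 = letters.drop (i + 2) := List.drop_drop ..
      rw [hdrop] at this
      simpa using this.symm
    have hnext : letters.getD (i + 1) ' ' = 'h' := by
      rw [getD_eq_headD_drop, hdrop1]; rfl
    rw [pvALoop, if_pos (by refine ⟨Or.inl rfl, by omega, Or.inl hnext⟩)]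
    rw [hnext]
    rw [pvALoop, if_neg (by rintro ⟨(h1 | h1), -, -⟩ <;> simp at h1), if_pos rfl]
    simp only [List.tail_cons] at ih
    rw [show i + 1 + 1 = i + 2 from rfl, ih (i + 2) (acc ++ [String.ofList ['c', 'h']]) hdrop2 hC hH]
    rw [pvBLoop, if_pos ⟨rfl, rfl⟩]
    simp
  | case3 c rest h ih =>
    intro i acc hdrop hC hH
    have hmemC : c ∈ letters := by
      have : c ∈ letters.drop i := by rw [hdrop]; exact List.mem_cons_self ..
      exact List.mem_of_mem_drop this
    have hlen : letters.length - i = rest.length + 1 := by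
      have := congrArg List.length hdrop
      simp at this; omega
    have hdrop1 : letters.drop (i + 1) = rest := by
      have : (letters.drop i).drop 1 = letters.drop (i + 1) := List.drop_drop ..
      rw [hdrop] at this
      simpa using this.symm
    have hcond : ¬ ((c = 'c' ∨ c = 'C') ∧ i < letters.length - 1 ∧
        (letters.getD (i + 1) ' ' = 'h' ∨ letters.getD (i + 1) ' ' = 'H')) := by
      rintro ⟨h1, h2, h3⟩
      have hcC : c ≠ 'C' := fun he => hC (he ▸ hmemC)
      have hc : c = 'c' := h1.resolve_right hcC
      have hrest : rest ≠ [] := by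
        intro he; rw [he] at hlen; simp at hlen; omega
      have hnd : letters.getD (i + 1) ' ' = rest.headD ' ' := by
        rw [getD_eq_headD_drop, hdrop1]
      have hmemN : rest.headD ' ' ∈ letters := by
        have : rest.headD ' ' ∈ rest := by
          cases rest with
          | nil => exact absurd rfl hrest
          | cons a b => exact List.mem_cons_self ..
        have : rest.headD ' ' ∈ letters.drop (i + 1) := by rw [hdrop1]; exact this
        exact List.mem_of_mem_drop this
      have hnH : rest.headD ' ' ≠ 'H' := fun he => hH (he ▸ hmemN)
      have hnh : rest.headD ' ' = 'h' := by
        rw [hnd] at h3; exact h3.resolve_right (hnd ▸ hnH)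
      have : rest.head? = some 'h' := by
        cases rest with
        | nil => exact absurd rfl hrest
        | cons a b => simp at hnh ⊢; exact hnh
      exact h ⟨hc, this⟩
    rw [pvALoop, if_neg hcond, if_neg (by simp)]
    rw [ih (i + 1) (acc ++ [String.ofList [c]]) hdrop1 hC hH]
    rw [pvBLoop, if_neg h]
    simp

-- ===== VERDICT (by name: the statement is the Claim_ definition above) =====
theorem split_to_characters_spec : Claim_equal_split_to_characters := by
  intro word _
  unfold Spec_split_to_characters split_to_characters split_to_characters_alt
  rw [PySem.Str.toList_lower]
  exact pvALoop_eq_pvBLoop _ _ 0 [] rfl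
    (not_mem_lower_of_upper _ 'C' rfl) (not_mem_lower_of_upper _ 'H' rfl)
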